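-- pv_equiv track=rewrite | github.com/dylanhoke/Python-Algorithm-Exercises-Solutions | Sorting/sumpairs.py | solution
-- ===== SOURCE A (Python) =====
-- def solution(a):
--
--
--     count = 0
--
--     for i in range(len(a)):
--
--         for j in range(i+1, len(a)):
--
--             sum_ = a[i] + a[j]
--
--             if sum_ in a:
--
--                 count += 1
--
--     return count
-- ===== SOURCE B (Python) =====
-- def solution(a):
--     vals = set(a)
--     total = 0
--     tail = a
--     while tail:
--         x, tail = tail[0], tail[1:]
--         total += sum(1 for y in tail if x + y in vals)
--     return total
-- ===== Notes on version B (the rewrite author's own statement) =====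
-- stated objective: faster
-- what changed: B walks the list by suffixes (no index arithmetic): it pops the head, counts partners in the remaining tail, and tests membership against a set built once instead of scanning the list inside the pair loop.
import Mathlib
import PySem

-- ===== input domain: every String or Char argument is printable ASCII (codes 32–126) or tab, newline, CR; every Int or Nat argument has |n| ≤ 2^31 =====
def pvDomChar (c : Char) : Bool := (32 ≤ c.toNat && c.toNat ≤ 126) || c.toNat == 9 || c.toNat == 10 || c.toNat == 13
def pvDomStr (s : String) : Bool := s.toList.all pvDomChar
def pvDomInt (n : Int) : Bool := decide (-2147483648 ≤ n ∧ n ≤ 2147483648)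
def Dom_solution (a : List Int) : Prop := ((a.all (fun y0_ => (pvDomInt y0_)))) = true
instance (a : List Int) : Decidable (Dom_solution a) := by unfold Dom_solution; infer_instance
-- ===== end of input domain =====

-- B walks the list by suffixes (head + tail, no index arithmetic) and tests pair sums against
-- a set built once, instead of A's indexed pair loop with a linear 'sum in a' scan (faster).

-- ===== PORT A =====
def solution (a : List Int) : Int :=
  (PySem.List.pyRange 0 (a.length : Int) 1).foldl (fun count i =>
    (PySem.List.pyRange (i + 1) (a.length : Int) 1).foldl (fun count j =>
      let sum_ := PySem.List.pyGetD a i 0 + PySem.List.pyGetD a j 0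
      if sum_ ∈ a then count + 1 else count) count) 0

-- ===== PORT B =====
-- the while loop: pop the head x, add the number of partners y in the tail with x+y ∈ vals
def goAlt (vals : PySem.Set Int) : List Int → Int → Int
  | [], total => total
  | x :: tail, total =>
      goAlt vals tail (total + (tail.countP (fun y => decide ((x + y) ∈ vals)) : Int))

def solution_alt (a : List Int) : Int :=
  let vals := PySem.Set.ofList a
  goAlt vals a 0

-- ===== PRECONDITION & SPEC =====
def Spec_solution (a : List Int) (out : Int) : Prop := out = solution_alt a
instance (a : List Int) (out : Int) : Decidable (Spec_solution a out) := by unfold Spec_solution; infer_instance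

-- ===== CLAIM (what is proved, stated in full; the proofs are below) =====
def Claim_equal_solution : Prop := ∀ (a : List Int), Dom_solution a → Spec_solution a (solution a)

-- ===== LEMMAS AND PROOFS =====

-- the multiset of pair sums a[i]+a[j], i<j, as A enumerates them
def pairSums (a : List Int) : List Int :=
  (PySem.List.pyRange 0 (a.length : Int) 1).flatMap (fun i =>
    (PySem.List.pyRange (i + 1) (a.length : Int) 1).map (fun j =>
      PySem.List.pyGetD a i 0 + PySem.List.pyGetD a j 0))

-- the same multiset, enumerated structurally as B does
def sums2 : List Int → List Int
  | [] => []
  | x :: rest => rest.map (fun y => x + y) ++ sums2 rest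

theorem foldl_flatMap' {α β δ : Type} (g : α → List β) (f : δ → β → δ) (l : List α) (init : δ) :
    (l.flatMap g).foldl f init = l.foldl (fun d x => (g x).foldl f d) init := by
  induction l generalizing init with
  | nil => rfl
  | cons x xs ih => simp [List.flatMap_cons, List.foldl_append, ih]

theorem solution_eq_countP (a : List Int) :
    solution a = ((pairSums a).countP (fun s => decide (s ∈ a)) : Int) := by
  have h1 : solution a = (pairSums a).foldl (fun c s => if s ∈ a then c + 1 else c) 0 := by
    unfold solution pairSums
    rw [foldl_flatMap']
    apply PySem.List.foldl_congr_mem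
    intro acc i _
    rw [List.foldl_map]
  rw [h1, PySem.List.foldl_ite_add_one, zero_add]

theorem pyRange_succ_shift (a b : Int) :
    PySem.List.pyRange (a + 1) (b + 1) 1 = (PySem.List.pyRange a b 1).map (fun k => k + 1) := by
  rw [PySem.List.pyRange_one, PySem.List.pyRange_one, List.map_map]
  have h : b + 1 - (a + 1) = b - a := by ring
  rw [h]
  apply List.map_congr_left
  intro k _
  simp [Function.comp]
  ring

theorem pyGetD_cons_succ (x : Int) (xs : List Int) (j d : Int)
    (h0 : 0 ≤ j) (h : j < (xs.length : Int)) :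
    PySem.List.pyGetD (x :: xs) (j + 1) d = PySem.List.pyGetD xs j d := by
  rw [PySem.List.pyGetD_eq_getElem (x :: xs) d (by omega) (by simp; omega),
      PySem.List.pyGetD_eq_getElem xs d h0 (by simpa using h)]
  have ht : (j + 1).toNat = j.toNat + 1 := by omega
  simp [ht]

theorem pairSums_eq_sums2 (a : List Int) : pairSums a = sums2 a := by
  induction a with
  | nil => simp [pairSums, sums2, PySem.List.pyRange_one_eq_nil]
  | cons x xs ih =>
    unfold pairSums sums2
    have hn : (0 : Int) < (((x :: xs).length : Int)) := by simp
    rw [PySem.List.pyRange_one_cons hn, List.flatMap_cons]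
    have hlen : (((x :: xs).length : Int)) = (xs.length : Int) + 1 := by simp
    congr 1
    · -- head chunk: pairs with the head element
      have hf : (fun j => PySem.List.pyGetD (x :: xs) 0 0 + PySem.List.pyGetD (x :: xs) j 0)
          = (fun v => x + v) ∘ (fun j => PySem.List.pyGetD (x :: xs) j 0) := by
        funext j
        simp [PySem.List.pyGetD_zero_cons, Function.comp]
      rw [hf, ← List.map_map]
      have h01 : (0 : Int) + 1 = 1 := by ring
      rw [h01]
      rw [PySem.List.map_pyGetD_pyRange' (x :: xs) 0 (show (0:Int) ≤ 1 by omega)]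
      simp
    · -- tail chunks: pairs within xs, after shifting every index by one
      rw [hlen]
      have hsh := pyRange_succ_shift 0 (xs.length : Int)
      rw [show (0 : Int) + 1 = 1 by ring] at hsh
      rw [show (0 : Int) + 1 = 1 by ring, hsh, List.flatMap_map]
      rw [← ih]
      unfold pairSums
      apply List.flatMap_congr
      intro i hi
      rw [PySem.List.mem_pyRange_one] at hi
      rw [pyRange_succ_shift (i + 1) (xs.length : Int), List.map_map]
      apply List.map_congr_left
      intro j hj
      rw [PySem.List.mem_pyRange_one] at hj
      simp only [Function.comp]
      rw [pyGetD_cons_succ x xs j 0 (by omega) (by omega),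
          pyGetD_cons_succ x xs i 0 (by omega) (by omega)]

theorem goAlt_eq (vals : PySem.Set Int) (l : List Int) (total : Int) :
    goAlt vals l total = total + ((sums2 l).countP (fun s => decide (s ∈ vals)) : Int) := by
  induction l generalizing total with
  | nil => simp [goAlt, sums2]
  | cons x tail ih =>
    rw [goAlt, ih]
    show _ = total + (((tail.map (fun y => x + y) ++ sums2 tail).countP
      (fun s => decide (s ∈ vals)) : Nat) : Int)
    rw [List.countP_append, List.countP_map]
    have : ((fun s => decide (s ∈ vals)) ∘ fun y => x + y) = (fun y => decide ((x + y) ∈ vals)) := by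
      funext y; rfl
    rw [this]
    push_cast
    ring

-- ===== VERDICT (by name: the statement is the Claim_ definition above) =====
theorem solution_spec : Claim_equal_solution := by
  intro a _
  unfold Spec_solution solution_alt
  rw [solution_eq_countP, pairSums_eq_sums2]
  show _ = goAlt (PySem.Set.ofList a) a 0
  rw [goAlt_eq, zero_add]
  congr 1
  apply List.countP_congr
  intro s _
  simp [PySem.Set.mem_ofList]
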